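-- pv_equiv track=rewrite | github.com/123kubix123/zum-projekt | DecompositionClassifier.py | exhaustive_codes
-- ===== SOURCE A (Python) =====
-- def exhaustive_codes(k, n):
--     """
--     When 3 <= k(lasy) <= 7, we construct a code of length 2^{k-1}-1 as follows. Row 1 is all ones. Row 2
--     consists of 2{k-2} zeroes followed by 2{k-2}-1 ones. Row 3 consists of 2{k-3}zeroes, followed by 2{k-3}
--     ones, followed by 2{k-3} zeroes, followed by 2{k-3}-1 ones.
--     In row i, there are alternating runs of 2{k-i} zeroes and ones.
--     :param k: class size
--     :param n: code_size
--     :return: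
--     """
--     codes = []
--     for i in range(k):
--         ones = [1 for i in range(2 ** (k - i))]
--         zeros = [0 for i in range(2 ** (k - i))]
--
--         if i%2 == 0:
--             tmp = (ones + zeros) * (i+1)
--         else:
--             tmp = (zeros + ones) * (i)
--         codes.append(tmp[:n].copy())
--     return codes
-- ===== SOURCE B (Python) =====
-- def exhaustive_codes(k, n):
--     codes = []
--     for i in range(k):
--         block = 2 ** (k - i)
--         reps = i + 1 if i % 2 == 0 else i
--         length = min(n, 2 * block * reps)
--         if i % 2 == 0:
--             row = [1 - (j // block) % 2 for j in range(length)]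
--         else:
--             row = [(j // block) % 2 for j in range(length)]
--         codes.append(row)
--     return codes
-- ===== Notes on version B (the rewrite author's own statement) =====
-- stated objective: alternative
-- what changed: Each row element is computed directly from its index as the parity of j // block, with the row length computed arithmetically as min(n, full period length), instead of building ones/zeros block lists, concatenating, repeating by list multiplication and slicing.
-- intended difference: For negative code size n with 0 < k and n > -2^(k+1), A's tmp[:n] silently applies Python's negative-index slicing and returns rows with |n| elements chopped off the end, while B returns empty rows; a non-positive requested code size should yield empty codes, so B's value is the intended one. — e.g. on exhaustive_codes(2, -1): A returns [[1, 1, 1, 1, 0, 0, 0], [0, 0, 1]], B returns [[], []]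
import Mathlib
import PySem

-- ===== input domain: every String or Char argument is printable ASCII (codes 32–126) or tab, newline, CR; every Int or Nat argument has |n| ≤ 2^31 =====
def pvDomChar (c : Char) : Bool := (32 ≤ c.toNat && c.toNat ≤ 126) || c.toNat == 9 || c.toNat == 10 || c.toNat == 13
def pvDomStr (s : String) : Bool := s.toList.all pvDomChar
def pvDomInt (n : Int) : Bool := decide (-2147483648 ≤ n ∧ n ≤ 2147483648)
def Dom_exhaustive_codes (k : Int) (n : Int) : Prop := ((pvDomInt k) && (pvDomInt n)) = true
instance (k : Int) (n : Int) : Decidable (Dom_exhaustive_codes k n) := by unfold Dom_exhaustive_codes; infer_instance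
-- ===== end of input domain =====

-- B computes each row element directly from its index (parity of j // block) with the
-- truncated row length min(n, period length), instead of building ones/zeros block lists,
-- concatenating, repeating and slicing them (objective: alternative decomposition).

-- ===== PORT A =====

-- Python's  xs * m  (list repetition; empty for m ≤ 0) — exact for every Int m
def pyListMul {α : Type} (xs : List α) (m : Int) : List α :=
  (List.replicate m.toNat xs).flatten

def exhaustive_codes (k : Int) (n : Int) : List (List Int) :=
  (PySem.List.pyRange 0 k 1).foldl (fun codes i =>
    -- 2 ** (k - i): inside the loop 0 ≤ i < k, so k - i ≥ 1 and the .toNat on the exponent is exact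
    let ones : List Int := (PySem.List.pyRange 0 ((2:Int) ^ (k - i).toNat) 1).map (fun _ => (1:Int))
    let zeros : List Int := (PySem.List.pyRange 0 ((2:Int) ^ (k - i).toNat) 1).map (fun _ => (0:Int))
    let tmp : List Int :=
      if PySem.Int.mod i 2 = 0 then pyListMul (ones ++ zeros) (i + 1)
      else pyListMul (zeros ++ ones) i
    codes ++ [PySem.List.slice tmp none (some n)]) []

-- ===== PORT B =====
def exhaustive_codes_alt (k : Int) (n : Int) : List (List Int) :=
  (PySem.List.pyRange 0 k 1).foldl (fun codes i =>
    let block : Int := (2:Int) ^ (k - i).toNat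
    let reps : Int := if PySem.Int.mod i 2 = 0 then i + 1 else i
    let length : Int := min n (2 * block * reps)
    let row : List Int :=
      if PySem.Int.mod i 2 = 0 then
        (PySem.List.pyRange 0 length 1).map
          (fun j => 1 - PySem.Int.mod (PySem.Int.floordiv j block) 2)
      else
        (PySem.List.pyRange 0 length 1).map
          (fun j => PySem.Int.mod (PySem.Int.floordiv j block) 2)
    codes ++ [row]) []

-- ===== PRECONDITION & SPEC =====
-- On negative n with 0 < k and n > -2^(k+1), A's tmp[:n] applies Python's negative-index
-- slicing and returns rows truncated from the END, while B returns empty rows; an empty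
-- code is the intended result for a non-positive code size.
def D_exhaustive_codes (k : Int) (n : Int) : Prop :=
  0 < k ∧ n < 0 ∧ -((2:Int) ^ (k + 1).toNat) < n
instance (k : Int) (n : Int) : Decidable (D_exhaustive_codes k n) := by
  unfold D_exhaustive_codes; infer_instance

def Spec_exhaustive_codes (k : Int) (n : Int) (out : List (List Int)) : Prop :=
  ¬ D_exhaustive_codes k n → out = exhaustive_codes_alt k n
instance (k : Int) (n : Int) (out : List (List Int)) : Decidable (Spec_exhaustive_codes k n out) := by unfold Spec_exhaustive_codes; infer_instance

def pvDiffWitness_exhaustive_codes : Int × Int := (2, -1)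
def pvDiffWitnessOut_exhaustive_codes : (List (List Int)) × (List (List Int)) :=
  ([[1, 1, 1, 1, 0, 0, 0], [0, 0, 1]], [[], []])

-- ===== CLAIM (what is proved, stated in full; the proofs are below) =====
def Claim_unchanged_exhaustive_codes : Prop := ∀ (k : Int) (n : Int), Dom_exhaustive_codes k n → Spec_exhaustive_codes k n (exhaustive_codes k n)
def Claim_changed_exhaustive_codes : Prop := Dom_exhaustive_codes (pvDiffWitness_exhaustive_codes.1) (pvDiffWitness_exhaustive_codes.2) ∧ D_exhaustive_codes (pvDiffWitness_exhaustive_codes.1) (pvDiffWitness_exhaustive_codes.2) ∧ exhaustive_codes (pvDiffWitness_exhaustive_codes.1) (pvDiffWitness_exhaustive_codes.2) = pvDiffWitnessOut_exhaustive_codes.1 ∧ exhaustive_codes_alt (pvDiffWitness_exhaustive_codes.1) (pvDiffWitness_exhaustive_codes.2) = pvDiffWitnessOut_exhaustive_codes.2 ∧ pvDiffWitnessOut_exhaustive_codes.1 ≠ pvDiffWitnessOut_exhaustive_codes.2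
def Claim_exact_exhaustive_codes : Prop := ∀ (k : Int) (n : Int), Dom_exhaustive_codes k n → D_exhaustive_codes k n → exhaustive_codes k n ≠ exhaustive_codes_alt k n

-- ===== LEMMAS AND PROOFS =====

-- the repeated block pattern, characterised element-by-element via run parity
lemma flatten_pattern (B : Nat) (hB : 0 < B) (o z : Int) (r : Nat) :
    (List.replicate r (List.replicate B o ++ List.replicate B z)).flatten
      = (List.range (2 * B * r)).map (fun j => if (j / B) % 2 = 0 then o else z) := by
  induction r with
  | zero => simp
  | succ r ih =>
    have hsplit : 2 * B * (r + 1) = 2 * B + 2 * B * r := by ring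
    rw [List.replicate_succ, List.flatten_cons, hsplit, List.range_add, List.map_append]
    congr 1
    · have h2 : 2 * B = B + B := by ring
      rw [h2, List.range_add, List.map_append]
      congr 1
      · rw [List.map_congr_left (g := fun _ => o) ?_, List.map_const', List.length_range]
        intro j hj
        have : j / B = 0 := Nat.div_eq_of_lt (List.mem_range.mp hj)
        simp [this]
      · rw [List.map_map, List.map_congr_left (g := fun _ => z) ?_, List.map_const',
            List.length_range]
        intro j hj
        have hd : (B + j) / B = 1 + j / B := by
          rw [Nat.add_div_left _ hB, Nat.div_eq_of_lt (List.mem_range.mp hj)]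
        simp [Function.comp, hd, Nat.div_eq_of_lt (List.mem_range.mp hj)]
    · rw [List.map_map, ih]
      apply List.map_congr_left
      intro j _
      have hd : (2 * B + j) / B = 2 + j / B := by
        rw [Nat.mul_comm 2 B, Nat.mul_add_div hB]
      simp [Function.comp, hd, Nat.add_mod_left]

-- Python slice xs[:n] of a mapped range, for any Int n (negative n drops from the end)
lemma slice_map_range (m : Nat) (f : Nat → Int) (n : Int) :
    PySem.List.slice ((List.range m).map f) none (some n)
      = (List.range (max 0 (min (if 0 ≤ n then n else (m : Int) + n) (m : Int))).toNat).map f := by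
  by_cases h : 0 ≤ n
  · rw [PySem.List.slice_to _ h, ← List.map_take, List.take_range]
    congr 2
    simp [h]
    omega
  · have hk : n = -(((-n).toNat : Nat) : Int) := by omega
    rw [show (some n : Option Int) = some (-(((-n).toNat : Nat) : Int)) by rw [← hk]]
    rw [PySem.List.slice_to_neg_natCast _ _ (by omega), ← List.map_take, List.length_map,
        List.length_range, List.take_range]
    congr 2
    simp [h]
    omega

-- a comprehension over range(t) whose body agrees with f on natural indices
lemma map_pyRange_zero (t : Int) (g : Int → Int) (f : Nat → Int)
    (h : ∀ j : Nat, g (j : Int) = f j) :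
    (PySem.List.pyRange 0 t 1).map g = (List.range t.toNat).map f := by
  rw [PySem.List.pyRange_one, List.map_map]
  simp only [sub_zero]
  refine List.map_congr_left ?_
  intro j _
  simpa using h j

-- B's element formulas agree with the if-parity form of the pattern
lemma row_even (B : Nat) (j : Nat) :
    1 - PySem.Int.mod (PySem.Int.floordiv (j : Int) ((B : Nat) : Int)) 2
      = if (j / B) % 2 = 0 then (1 : Int) else 0 := by
  rw [PySem.Int.floordiv_natCast,
      show PySem.Int.mod ((j / B : Nat) : Int) 2 = (((j / B) % 2 : Nat) : Int) from by
        exact_mod_cast PySem.Int.mod_natCast (j / B) 2]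
  rcases Nat.mod_two_eq_zero_or_one (j / B) with h | h <;> simp [h]

lemma row_odd (B : Nat) (j : Nat) :
    PySem.Int.mod (PySem.Int.floordiv (j : Int) ((B : Nat) : Int)) 2
      = if (j / B) % 2 = 0 then (0 : Int) else 1 := by
  rw [PySem.Int.floordiv_natCast,
      show PySem.Int.mod ((j / B : Nat) : Int) 2 = (((j / B) % 2 : Nat) : Int) from by
        exact_mod_cast PySem.Int.mod_natCast (j / B) 2]
  rcases Nat.mod_two_eq_zero_or_one (j / B) with h | h <;> simp [h]

-- every full period length 2 * 2^(k-i) * reps is at most 2^(k+1) (Nat side)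
lemma period_le (e inat : Nat) (r : Nat) (hr2 : r ≤ 2 ^ inat) :
    2 * 2 ^ e * r ≤ 2 ^ (e + inat + 1) := by
  calc 2 * 2 ^ e * r ≤ 2 * 2 ^ e * 2 ^ inat := Nat.mul_le_mul_left _ hr2
    _ = 2 ^ (e + inat + 1) := by ring

-- ===== VERDICT (by name: the statement is the Claim_ definition above) =====
theorem exhaustive_codes_spec : Claim_unchanged_exhaustive_codes := by
  intro k n _ hnd
  show exhaustive_codes k n = exhaustive_codes_alt k n
  unfold exhaustive_codes exhaustive_codes_alt
  rw [PySem.List.foldl_append_singleton_eq_map, PySem.List.foldl_append_singleton_eq_map]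
  refine congrArg _ (List.map_congr_left ?_)
  intro i hi
  obtain ⟨hi0, hik⟩ := (PySem.List.mem_pyRange_one).mp hi
  set e : Nat := (k - i).toNat with he
  have hbB : ((2:Int) ^ e) = ((2 ^ e : Nat) : Int) := by push_cast; ring
  set B : Nat := 2 ^ e with hBdef
  have hB : 0 < B := Nat.two_pow_pos e
  have hones : (PySem.List.pyRange 0 ((2:Int) ^ e) 1).map (fun _ => (1:Int))
      = List.replicate B (1:Int) := by
    rw [PySem.List.pyRange_one, List.map_map]
    simp only [Function.comp_def]
    rw [List.map_const', List.length_range, hbB]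
    simp
  have hzeros : (PySem.List.pyRange 0 ((2:Int) ^ e) 1).map (fun _ => (0:Int))
      = List.replicate B (0:Int) := by
    rw [PySem.List.pyRange_one, List.map_map]
    simp only [Function.comp_def]
    rw [List.map_const', List.length_range, hbB]
    simp
  -- the non-D_ hypothesis, specialised knowing 0 < k
  have hk0 : 0 < k := lt_of_le_of_lt hi0 hik
  have hcase : 0 ≤ n ∨ n ≤ -((2:Int) ^ (k + 1).toNat) := by
    by_contra hc
    apply hnd
    unfold D_exhaustive_codes
    exact ⟨hk0, by omega, by omega⟩
  have hexp : (k + 1).toNat = e + i.toNat + 1 := by omega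
  rcases PySem.Int.mod_two_eq i with hpar | hpar
  · -- even i
    rw [hpar]
    simp only [if_true]
    set r : Nat := (i + 1).toNat with hr
    have hrc : ((r : Nat) : Int) = i + 1 := by omega
    rw [hones, hzeros]
    unfold pyListMul
    rw [show (i + 1).toNat = r from rfl, flatten_pattern B hB 1 0 r, slice_map_range, hbB]
    have hL : 2 * ((B : Nat) : Int) * (i + 1) = ((2 * B * r : Nat) : Int) := by
      push_cast; rw [hrc]
    rw [hL, map_pyRange_zero _ _ _ (row_even B)]
    -- lengths agree outside D_
    have hr2 : r ≤ 2 ^ i.toNat := by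
      have := Nat.lt_two_pow_self (n := i.toNat)
      omega
    have hper : 2 * B * r ≤ 2 ^ (e + i.toNat + 1) := period_le e i.toNat r hr2
    have hperZ : ((2 * B * r : Nat) : Int) ≤ (2:Int) ^ (k + 1).toNat := by
      rw [hexp]; exact_mod_cast hper
    congr 2
    have hpos : (0:Int) < (2:Int) ^ (k + 1).toNat := by positivity
    rcases hcase with h0 | hneg
    · rw [if_pos h0]; omega
    · rw [if_neg (by omega : ¬ (0 ≤ n))]; omega
  · -- odd i
    rw [hpar]
    simp only [show ((1:Int) = 0) = False from by norm_num, if_false]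
    set r : Nat := i.toNat with hr
    have hrc : ((r : Nat) : Int) = i := by omega
    rw [hones, hzeros]
    unfold pyListMul
    rw [show i.toNat = r from rfl, flatten_pattern B hB 0 1 r, slice_map_range, hbB]
    have hL : 2 * ((B : Nat) : Int) * i = ((2 * B * r : Nat) : Int) := by
      push_cast; rw [hrc]
    rw [hL, map_pyRange_zero _ _ _ (row_odd B)]
    have hr2 : r ≤ 2 ^ i.toNat := by
      have := Nat.lt_two_pow_self (n := i.toNat)
      omega
    have hper : 2 * B * r ≤ 2 ^ (e + i.toNat + 1) := period_le e i.toNat r hr2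
    have hperZ : ((2 * B * r : Nat) : Int) ≤ (2:Int) ^ (k + 1).toNat := by
      rw [hexp]; exact_mod_cast hper
    congr 2
    have hpos : (0:Int) < (2:Int) ^ (k + 1).toNat := by positivity
    rcases hcase with h0 | hneg
    · rw [if_pos h0]; omega
    · rw [if_neg (by omega : ¬ (0 ≤ n))]; omega

theorem exhaustive_codes_changed : Claim_changed_exhaustive_codes := by
  unfold Claim_changed_exhaustive_codes; decide

theorem exhaustive_codes_tight : Claim_exact_exhaustive_codes := by
  intro k n _ hd heq
  obtain ⟨hk0, hn0, hnl⟩ := hd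
  -- compare row 0 of both sides
  have h0 : (0:Int) ∈ PySem.List.pyRange 0 k 1 := PySem.List.mem_pyRange_one.mpr ⟨le_refl _, hk0⟩
  unfold exhaustive_codes exhaustive_codes_alt at heq
  rw [PySem.List.foldl_append_singleton_eq_map, PySem.List.foldl_append_singleton_eq_map] at heq
  have hfun := congrArg (fun xs => PySem.List.pyGetD xs 0 ([] : List Int)) heq
  simp only [List.nil_append] at hfun
  rw [PySem.List.pyGetD_map_pyRange_of_nonneg _ k 0 _ (le_refl 0) hk0,
      PySem.List.pyGetD_map_pyRange_of_nonneg _ k 0 _ (le_refl 0) hk0] at hfun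
  -- evaluate both rows at i = 0
  have hmod0 : PySem.Int.mod (0:Int) 2 = 0 := by decide
  simp only [hmod0, if_true, sub_zero, zero_add] at hfun
  set e : Nat := k.toNat with he
  have hbB : ((2:Int) ^ e) = ((2 ^ e : Nat) : Int) := by push_cast; ring
  set B : Nat := 2 ^ e with hBdef
  have hB : 0 < B := Nat.two_pow_pos e
  have hones : (PySem.List.pyRange 0 ((2:Int) ^ e) 1).map (fun _ => (1:Int))
      = List.replicate B (1:Int) := by
    rw [PySem.List.pyRange_one, List.map_map]
    simp only [Function.comp_def]
    rw [List.map_const', List.length_range, hbB]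
    simp
  have hzeros : (PySem.List.pyRange 0 ((2:Int) ^ e) 1).map (fun _ => (0:Int))
      = List.replicate B (0:Int) := by
    rw [PySem.List.pyRange_one, List.map_map]
    simp only [Function.comp_def]
    rw [List.map_const', List.length_range, hbB]
    simp
  rw [hones, hzeros] at hfun
  unfold pyListMul at hfun
  rw [show (Int.toNat 1) = 1 from rfl, flatten_pattern B hB 1 0 1, slice_map_range, hbB] at hfun
  -- A's row 0 is nonempty, B's row 0 is empty
  have hexp : (k + 1).toNat = e + 1 := by omega
  have hBZ : ((2 * B * 1 : Nat) : Int) = (2:Int) ^ (k + 1).toNat := by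
    rw [hexp]; push_cast [hBdef]; ring
  have hlenA : 0 < (max 0 (min (if 0 ≤ n then n else ((2 * B * 1 : Nat) : Int) + n)
      ((2 * B * 1 : Nat) : Int))).toNat := by
    rw [if_neg (by omega)]
    have h1 : (0:Int) < ((2 * B * 1 : Nat) : Int) + n := by omega
    have h2 : ((2 * B * 1 : Nat) : Int) + n < ((2 * B * 1 : Nat) : Int) := by omega
    omega
  have hBempty : (PySem.List.pyRange 0 (min n (2 * ((B : Nat) : Int) * 1)) 1).map
      (fun j => 1 - PySem.Int.mod (PySem.Int.floordiv j ((B : Nat) : Int)) 2) = [] := by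
    rw [PySem.List.pyRange_one]
    have h0' : (min n (2 * ((B : Nat) : Int) * 1) - 0).toNat = 0 := by omega
    rw [h0']
    simp
  rw [hBempty] at hfun
  have := congrArg List.length hfun
  simp only [List.length_map, List.length_range, List.length_nil] at this
  omega
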